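-- pv_equiv track=rewrite | github.com/maltesIam/cyberdemo | backend/src/generators/gen_ctem.py | _calculate_asset_risk
-- ===== SOURCE A (Python) =====
-- from typing import Dict, List, Tuple
--
-- def _calculate_asset_risk(findings: List[Dict]) -> str:
--     """
--     Calculate aggregated risk color for an asset based on its findings.
--
--     Returns:
--         Risk color: "Green", "Yellow", or "Red"
--     """
--     if not findings:
--         return "Green"
--
--     # Count open findings by severity
--     open_findings = [f for f in findings if f.get("remediation_status") in ["open", "in_progress"]]
--
--     if not open_findings:
--         return "Green"
--
--     critical_count = sum(1 for f in open_findings if f.get("severity") == "Critical")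
--     high_count = sum(1 for f in open_findings if f.get("severity") == "High")
--     medium_count = sum(1 for f in open_findings if f.get("severity") == "Medium")
--
--     # Risk calculation logic
--     if critical_count >= 1:
--         return "Red"
--     elif high_count >= 3:
--         return "Red"
--     elif high_count >= 1:
--         return "Yellow"
--     elif medium_count >= 5:
--         return "Yellow"
--     elif medium_count >= 2:
--         return "Yellow"
--     else:
--         return "Green"
-- ===== SOURCE B (Python) =====
-- _SEV_RANK = {"Critical": 3, "High": 2, "Medium": 1}
--
--
-- def _calculate_asset_risk(findings):
--     """Sort the open findings' severity ranks descending; decide by inspecting the top of the sorted list."""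
--     ranks = sorted(
--         (_SEV_RANK.get(f.get("severity"), 0)
--          for f in findings
--          if f.get("remediation_status") in ("open", "in_progress")),
--         reverse=True,
--     )
--     if not ranks:
--         return "Green"
--     if ranks[0] == 3 or ranks[:3] == [2, 2, 2]:
--         return "Red"
--     if ranks[0] == 2 or ranks[:2] == [1, 1]:
--         return "Yellow"
--     return "Green"
-- ===== Notes on version B (the rewrite author's own statement) =====
-- stated objective: alternative
-- what changed: B replaces A's filtered-list-plus-three-counting-scans-plus-threshold-ladder with a sort-based decision: it maps each open finding to a numeric severity rank, sorts the ranks descending, and reads the color directly off the top of the sorted list (top==Critical or top three all High -> Red; top==High or top two Medium -> Yellow).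
import Mathlib
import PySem

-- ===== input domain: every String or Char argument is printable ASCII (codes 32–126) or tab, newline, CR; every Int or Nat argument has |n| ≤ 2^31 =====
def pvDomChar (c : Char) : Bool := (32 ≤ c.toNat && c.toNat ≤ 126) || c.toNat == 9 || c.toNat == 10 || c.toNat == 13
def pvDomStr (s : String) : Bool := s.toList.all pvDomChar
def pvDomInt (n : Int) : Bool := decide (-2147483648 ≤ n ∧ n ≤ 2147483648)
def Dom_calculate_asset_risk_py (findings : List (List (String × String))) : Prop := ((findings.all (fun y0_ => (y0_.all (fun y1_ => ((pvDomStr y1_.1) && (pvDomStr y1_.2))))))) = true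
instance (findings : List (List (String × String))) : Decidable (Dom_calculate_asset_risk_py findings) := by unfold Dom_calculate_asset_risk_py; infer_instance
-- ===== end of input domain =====

-- B replaces A's filtered-list-plus-three-counting-scans-plus-threshold-ladder with a
-- sort-based decision: sort the open findings' severity ranks descending and read the
-- color off the top of the sorted list (objective: alternative algorithm, same value).

-- ===== PORT A =====
-- dict.get(k): first match in the association list (exact for Python dicts, whose keys are unique)
def pvGet? (f : List (String × String)) (k : String) : Option String :=
  (f.find? (fun p => p.1 == k)).map (·.2)

-- f.get("remediation_status") in ["open", "in_progress"]
def pvIsOpen (f : List (String × String)) : Bool :=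
  pvGet? f "remediation_status" == some "open" ||
  pvGet? f "remediation_status" == some "in_progress"

def calculate_asset_risk_py (findings : List (List (String × String))) : String :=
  if findings = [] then "Green" else
  let open_findings := findings.filter pvIsOpen
  if open_findings = [] then "Green" else
  let critical_count := open_findings.countP (fun f => pvGet? f "severity" == some "Critical")
  let high_count := open_findings.countP (fun f => pvGet? f "severity" == some "High")
  let medium_count := open_findings.countP (fun f => pvGet? f "severity" == some "Medium")
  if 1 ≤ critical_count then "Red"
  else if 3 ≤ high_count then "Red"
  else if 1 ≤ high_count then "Yellow"
  else if 5 ≤ medium_count then "Yellow"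
  else if 2 ≤ medium_count then "Yellow"
  else "Green"

-- ===== PORT B =====
-- _SEV_RANK.get(f.get("severity"), 0)
def pvRankOf (f : List (String × String)) : Nat :=
  if pvGet? f "severity" == some "Critical" then 3
  else if pvGet? f "severity" == some "High" then 2
  else if pvGet? f "severity" == some "Medium" then 1
  else 0

def calculate_asset_risk_py_alt (findings : List (List (String × String))) : String :=
  -- sorted(<genexp of ranks of open findings>, reverse=True)
  let ranks := PySem.List.sorted ((findings.filter pvIsOpen).map pvRankOf) (fun x => x) true
  match ranks with
  | [] => "Green"                                   -- if not ranks
  | r0 :: _ =>                                      -- ranks[0] is r0 (list nonempty, no IndexError)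
    if r0 == 3 || PySem.List.slice ranks none (some 3) == [2, 2, 2] then "Red"
    else if r0 == 2 || PySem.List.slice ranks none (some 2) == [1, 1] then "Yellow"
    else "Green"

-- ===== PRECONDITION & SPEC =====
def Spec_calculate_asset_risk_py (findings : List (List (String × String))) (out : String) : Prop := out = calculate_asset_risk_py_alt findings
instance (findings : List (List (String × String))) (out : String) : Decidable (Spec_calculate_asset_risk_py findings out) := by unfold Spec_calculate_asset_risk_py; infer_instance

-- ===== CLAIM (what is proved, stated in full; the proofs are below) =====
def Claim_equal_calculate_asset_risk_py : Prop := ∀ (findings : List (List (String × String))), Dom_calculate_asset_risk_py findings → Spec_calculate_asset_risk_py findings (calculate_asset_risk_py findings)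

-- ===== LEMMAS AND PROOFS =====

-- a list of ranks (all ≤ 3) is a permutation of its canonical sorted-descending form
lemma pvPerm_canon (l : List Nat) (hle : ∀ x ∈ l, x ≤ 3) :
    l.Perm (List.replicate (l.count 3) 3 ++ List.replicate (l.count 2) 2 ++
            List.replicate (l.count 1) 1 ++ List.replicate (l.count 0) 0) := by
  rw [List.perm_iff_count]
  intro a
  simp only [List.count_append, List.count_replicate]
  by_cases h3 : a = 3 <;> by_cases h2 : a = 2 <;> by_cases h1 : a = 1 <;> by_cases h0 : a = 0 <;>
    simp_all
  have : a ∉ l := fun hmem => by have := hle a hmem; omega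
  simp [List.count_eq_zero.mpr this]

-- the canonical form is pairwise descending
lemma pvCanon_pairwise (c h m z : Nat) :
    List.Pairwise (fun a b : Nat => b ≤ a)
      (List.replicate c 3 ++ List.replicate h 2 ++ List.replicate m 1 ++ List.replicate z 0) := by
  repeat
    apply List.pairwise_append.mpr
    refine ⟨?_, ?_, ?_⟩
  all_goals
    first
      | (apply List.pairwise_replicate.mpr; simp)
      | (intro a ha b hb
         simp only [List.mem_append, List.mem_replicate] at ha hb
         omega)

-- sorted-descending of a rank list IS its canonical form
lemma pvSorted_canon (l : List Nat) (hle : ∀ x ∈ l, x ≤ 3) :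
    PySem.List.sorted l (fun x => x) true =
      List.replicate (l.count 3) 3 ++ List.replicate (l.count 2) 2 ++
      List.replicate (l.count 1) 1 ++ List.replicate (l.count 0) 0 := by
  apply PySem.List.eq_of_perm_of_pairwise_le_of_injective
      (key := fun n : Nat => (-(n : Int)))
  · intro a b hab; simpa using hab
  · exact (PySem.List.sorted_perm l (fun x => x) true).trans (pvPerm_canon l hle)
  · have := PySem.List.sorted_pairwise_rev l (fun x : Nat => x)
    exact this.imp (by intro a b hba; simpa using hba)
  · exact (pvCanon_pairwise _ _ _ _).imp (by intro a b hba; simpa using hba)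

-- count of a given rank = A's countP of the corresponding severity
lemma pvCount_rank_3 (l : List (List (String × String))) :
    (l.map pvRankOf).count 3 = l.countP (fun f => pvGet? f "severity" == some "Critical") := by
  rw [List.count, List.countP_map]
  apply List.countP_congr
  intro f _
  simp only [Function.comp, pvRankOf]
  by_cases hc : (pvGet? f "severity" == some "Critical") = true <;> [simp [hc]; (simp [hc]; split_ifs <;> simp)]
lemma pvCount_rank_2 (l : List (List (String × String))) :
    (l.map pvRankOf).count 2 = l.countP (fun f => pvGet? f "severity" == some "High") := by
  rw [List.count, List.countP_map]
  apply List.countP_congr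
  intro f _
  simp only [Function.comp, pvRankOf]
  by_cases hc : (pvGet? f "severity" == some "Critical") = true <;>
    by_cases hh : (pvGet? f "severity" == some "High") = true <;> simp_all <;> split_ifs <;> simp
lemma pvCount_rank_1 (l : List (List (String × String))) :
    (l.map pvRankOf).count 1 = l.countP (fun f => pvGet? f "severity" == some "Medium") := by
  rw [List.count, List.countP_map]
  apply List.countP_congr
  intro f _
  simp only [Function.comp, pvRankOf]
  by_cases hc : (pvGet? f "severity" == some "Critical") = true <;>
    by_cases hh : (pvGet? f "severity" == some "High") = true <;>
      by_cases hm : (pvGet? f "severity" == some "Medium") = true <;> simp_all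

-- the four rank counts partition the list
lemma pvCount_partition (l : List Nat) (hle : ∀ x ∈ l, x ≤ 3) :
    l.count 3 + l.count 2 + l.count 1 + l.count 0 = l.length := by
  induction l with
  | nil => simp
  | cons a t ih =>
    have ha : a ≤ 3 := hle a (List.mem_cons_self ..)
    have ih' := ih (fun x hx => hle x (List.mem_cons_of_mem _ hx))
    simp only [List.count_cons, List.length_cons]
    interval_cases a <;> simp <;> omega

-- B's decision on the canonical descending list, as a function of the counts
lemma pvDecideB (c h m z : Nat) (hnz : c + h + m + z ≠ 0) :
    (match (List.replicate c 3 ++ List.replicate h 2 ++ List.replicate m 1 ++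
            List.replicate z 0 : List Nat) with
      | [] => "Green"
      | r0 :: _ =>
        if r0 == 3 || PySem.List.slice (List.replicate c 3 ++ List.replicate h 2 ++
            List.replicate m 1 ++ List.replicate z 0) none (some 3) == [2, 2, 2] then "Red"
        else if r0 == 2 || PySem.List.slice (List.replicate c 3 ++ List.replicate h 2 ++
            List.replicate m 1 ++ List.replicate z 0) none (some 2) == [1, 1] then "Yellow"
        else "Green") =
      (if 1 ≤ c then "Red" else if 3 ≤ h then "Red" else if 1 ≤ h then "Yellow"
       else if 5 ≤ m then "Yellow" else if 2 ≤ m then "Yellow" else "Green") := by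
  rw [PySem.List.slice_to _ (by norm_num), PySem.List.slice_to _ (by norm_num)]
  rcases c with _ | c
  · rcases h with _ | _ | _ | h
    · rcases m with _ | _ | m
      · rcases z with _ | z
        · omega
        · simp [List.replicate_succ]
      · rcases z with _ | z <;> simp [List.replicate_succ]
      · rcases z with _ | z <;> simp [List.replicate_succ]
    · rcases m with _ | _ | m <;> rcases z with _ | z <;> simp [List.replicate_succ]
    · rcases m with _ | _ | m <;> rcases z with _ | z <;> simp [List.replicate_succ]
    · simp [List.replicate_succ]
  · simp [List.replicate_succ]

-- ===== VERDICT (by name: the statement is the Claim_ definition above) =====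
theorem calculate_asset_risk_py_spec : Claim_equal_calculate_asset_risk_py := by
  intro findings _
  unfold Spec_calculate_asset_risk_py calculate_asset_risk_py calculate_asset_risk_py_alt
  have hle : ∀ x ∈ (findings.filter pvIsOpen).map pvRankOf, x ≤ 3 := by
    intro x hx
    rcases List.mem_map.mp hx with ⟨f, _, rfl⟩
    unfold pvRankOf; split_ifs <;> omega
  rw [pvSorted_canon _ hle]
  by_cases hnil : findings = []
  · simp [hnil]
  · simp only [hnil, if_false]
    by_cases hofs : findings.filter pvIsOpen = []
    · simp [hofs]
    · simp only [hofs, if_false]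
      have hlen : (findings.filter pvIsOpen).length ≠ 0 := by
        simpa [List.length_eq_zero_iff] using hofs
      have hpart := pvCount_partition _ hle
      rw [List.length_map] at hpart
      rw [pvCount_rank_3, pvCount_rank_2, pvCount_rank_1] at *
      rw [pvDecideB _ _ _ _ (by omega)]
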